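-- pv_equiv track=rewrite | github.com/delfinaronco/algoritmos-1 | jugamos.py | artista_mas_escuchado
-- ===== SOURCE A (Python) =====
-- def suma_reproducciones (reproduccioness: list) -> int:
--     suma: int = 0
--
--     for (cancion,numero) in reproduccioness:
--         suma += numero
--
--     return suma
--
-- def maximo (l: list) -> int:
--     max = l[0]
--
--     for i in range(len(l)):
--         if l[i] >= max:
--             max = l[i]
--
--     return max
--
-- def artista_mas_escuchado (reproducciones: dict) -> str:
--
--     reproducciones_por_artista: dict = {}
--     numeros: list = []
--
--     for artista,canciones in reproducciones.items():
--         reproducciones_por_artista[artista] = suma_reproducciones(canciones)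
--         numeros.append(reproducciones_por_artista[artista])
--
--     for artista,numero in reproducciones_por_artista.items():
--         if maximo(numeros) == numero:
--             return artista
-- ===== SOURCE B (Python) =====
-- def artista_mas_escuchado(reproducciones: dict) -> str:
--     mejor = None
--     mejor_suma = None
--     for artista, canciones in reproducciones.items():
--         total = sum(n for _, n in canciones)
--         if mejor is None or total > mejor_suma:
--             mejor = artista
--             mejor_suma = total
--     return mejor
-- ===== Notes on version B (the rewrite author's own statement) =====
-- stated objective: simpler
-- what changed: Replaced A's build-a-totals-dict + parallel numeros list + second pass that rescans maximo(numeros) per artist with a single running-best loop that keeps the first artist whose total strictly exceeds the best so far.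
-- outside the precondition, e.g. on artista_mas_escuchado({}): A returns None, B returns None
import Mathlib
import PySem

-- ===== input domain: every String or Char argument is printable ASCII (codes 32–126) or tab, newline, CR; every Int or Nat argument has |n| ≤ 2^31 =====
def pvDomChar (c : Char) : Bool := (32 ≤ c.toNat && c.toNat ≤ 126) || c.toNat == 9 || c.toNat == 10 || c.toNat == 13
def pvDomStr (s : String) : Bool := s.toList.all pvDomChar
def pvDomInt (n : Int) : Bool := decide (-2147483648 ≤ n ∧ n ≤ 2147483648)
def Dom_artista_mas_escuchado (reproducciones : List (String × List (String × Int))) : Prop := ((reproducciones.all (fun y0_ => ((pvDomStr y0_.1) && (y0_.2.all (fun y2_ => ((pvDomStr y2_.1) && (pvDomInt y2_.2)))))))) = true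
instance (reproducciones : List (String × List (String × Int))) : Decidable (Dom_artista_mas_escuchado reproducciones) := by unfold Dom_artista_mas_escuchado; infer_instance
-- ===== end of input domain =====

-- B fuses A's totals dict, parallel list and repeated maximo rescans into one running-best pass (objective: simpler; not measured faster).

-- ===== PORT A =====
def suma_reproducciones (reproduccioness : List (String × Int)) : Int :=
  reproduccioness.foldl (fun suma p => suma + p.2) 0

-- maximo: `max = l[0]`; under Pre_ it is only ever applied to a nonempty list, so pyGetD's default is never read
def maximo (l : List Int) : Int :=
  (PySem.List.pyRange 0 (l.length : Int) 1).foldl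
    (fun mx i => if mx ≤ PySem.List.pyGetD l i 0 then PySem.List.pyGetD l i 0 else mx)
    (PySem.List.pyGetD l 0 0)

def artista_mas_escuchado (reproducciones : List (String × List (String × Int))) : String :=
  let st := reproducciones.foldl
    (fun (st : PySem.Dict String Int × List Int) p =>
      let d := st.1.insert p.1 (suma_reproducciones p.2)
      (d, st.2 ++ [d.getD p.1 0]))
    (PySem.Dict.empty, [])
  -- second loop: return the first artist whose total equals maximo(numeros);
  -- falling off the end Python returns None (only on the empty dict) — excluded by Pre_, rendered ""
  match st.1.items.find? (fun q => maximo st.2 == q.2) with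
  | some q => q.1
  | none => ""

-- ===== PORT B =====
def artista_mas_escuchado_alt (reproducciones : List (String × List (String × Int))) : String :=
  let best := reproducciones.foldl
    (fun (best : Option (String × Int)) p =>
      let total := (p.2.map Prod.snd).sum
      match best with
      | none => some (p.1, total)
      | some (a, s) => if s < total then some (p.1, total) else some (a, s))
    none
  -- Python B returns None on the empty dict — excluded by Pre_, rendered ""
  match best with
  | some (a, _) => a
  | none => ""

-- ===== PRECONDITION & SPEC =====
-- Pre_ excludes the empty dict, on which A falls through both loops and returns None (not a str);
-- the Nodup conjunct only mirrors the Python dict invariant (a dict cannot present duplicate keys) on the list encoding.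
def Pre_artista_mas_escuchado (reproducciones : List (String × List (String × Int))) : Prop :=
  reproducciones ≠ [] ∧ (reproducciones.map Prod.fst).Nodup
instance (reproducciones : List (String × List (String × Int))) : Decidable (Pre_artista_mas_escuchado reproducciones) := by unfold Pre_artista_mas_escuchado; infer_instance
def pvWitness_artista_mas_escuchado : (List (String × List (String × Int))) :=
  [("ana", [("x", 3), ("y", 2)]), ("bob", [("z", 5)])]

def Spec_artista_mas_escuchado (reproducciones : List (String × List (String × Int))) (out : String) : Prop := out = artista_mas_escuchado_alt reproducciones
instance (reproducciones : List (String × List (String × Int))) (out : String) : Decidable (Spec_artista_mas_escuchado reproducciones out) := by unfold Spec_artista_mas_escuchado; infer_instance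

-- ===== CLAIM (what is proved, stated in full; the proofs are below) =====
def Claim_equal_artista_mas_escuchado : Prop := ∀ (reproducciones : List (String × List (String × Int))), Dom_artista_mas_escuchado reproducciones → Pre_artista_mas_escuchado reproducciones → Spec_artista_mas_escuchado reproducciones (artista_mas_escuchado reproducciones)

-- ===== LEMMAS AND PROOFS =====

-- A's first loop with the just-inserted lookup already resolved
theorem aloop_aux (l : List (String × List (String × Int))) (d : PySem.Dict String Int) (ns : List Int) :
    l.foldl
      (fun (st : PySem.Dict String Int × List Int) p =>
        (st.1.insert p.1 (suma_reproducciones p.2), st.2 ++ [suma_reproducciones p.2]))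
      (d, ns)
    = (l.foldl (fun d p => d.insert p.1 (suma_reproducciones p.2)) d,
       ns ++ l.map (fun p => suma_reproducciones p.2)) := by
  induction l generalizing d ns with
  | nil => simp
  | cons p l ih =>
    simp only [List.foldl_cons]
    rw [ih]; simp

-- A's first loop: the carried pair is (dict of totals, list of totals)
theorem aloop_eq (l : List (String × List (String × Int))) (d : PySem.Dict String Int) (ns : List Int) :
    l.foldl
      (fun (st : PySem.Dict String Int × List Int) p =>
        let d := st.1.insert p.1 (suma_reproducciones p.2)
        (d, st.2 ++ [d.getD p.1 0]))
      (d, ns)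
    = (l.foldl (fun d p => d.insert p.1 (suma_reproducciones p.2)) d,
       ns ++ l.map (fun p => suma_reproducciones p.2)) := by
  simp only [PySem.Dict.getD_insert_self]
  exact aloop_aux l d ns

theorem suma_eq_sum (l : List (String × Int)) : suma_reproducciones l = (l.map Prod.snd).sum := by
  unfold suma_reproducciones
  have h : ∀ (l : List (String × Int)) (a : Int),
      l.foldl (fun suma p => suma + p.2) a = a + (l.map Prod.snd).sum := by
    intro l
    induction l with
    | nil => simp
    | cons q l ih => intro a; simp only [List.foldl_cons, List.map_cons, List.sum_cons, ih]; ring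
  simpa using h l 0

theorem maximo_eq_foldl_max (x : Int) (xs : List Int) :
    maximo (x :: xs) = xs.foldl max x := by
  unfold maximo
  rw [PySem.List.foldl_pyRange_zero_pyGetD' (x :: xs) 0
      (fun mx v => if mx ≤ v then v else mx) (PySem.List.pyGetD (x :: xs) 0 0)]
  have hmax : (fun (mx v : Int) => if mx ≤ v then v else mx) = max := by
    funext a b; rw [max_def]
  rw [hmax]
  simp [PySem.List.pyGetD_zero_cons]

theorem le_foldl_max_self (xs : List Int) (a : Int) : a ≤ xs.foldl max a := by
  induction xs generalizing a with
  | nil => simp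
  | cons y ys ih => exact le_trans (le_max_left a y) (ih (max a y))

theorem le_foldl_max_of_mem (xs : List Int) (a x : Int) (hx : x ∈ xs) : x ≤ xs.foldl max a := by
  induction xs generalizing a with
  | nil => simp at hx
  | cons y ys ih =>
    simp only [List.foldl_cons]
    rcases List.mem_cons.mp hx with h | h
    · subst h; exact le_trans (le_max_right a x) (le_foldl_max_self ys _)
    · exact ih _ h

theorem foldl_max_eq_of_le (xs : List Int) (a : Int) (h : ∀ x ∈ xs, x ≤ a) :
    xs.foldl max a = a := by
  induction xs with
  | nil => simp
  | cons y ys ih =>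
    simp only [List.foldl_cons, max_eq_left (h y List.mem_cons_self)]
    exact ih (fun x hx => h x (List.mem_cons_of_mem _ hx))

theorem bfold_spec (ps : List (String × Int)) (a : String) (s : Int) :
    ps.foldl
      (fun (best : Option (String × Int)) q =>
        match best with
        | none => some (q.1, q.2)
        | some (a, s) => if s < q.2 then some (q.1, q.2) else some (a, s))
      (some (a, s))
    = if ∀ x ∈ ps, x.2 ≤ s then some (a, s)
      else ps.find? (fun q => q.2 == (ps.map Prod.snd).foldl max s) := by
  induction ps generalizing a s with
  | nil => simp
  | cons p ps ih =>
    simp only [List.foldl_cons, List.map_cons]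
    by_cases hp : p.2 ≤ s
    · rw [if_neg (not_lt.mpr hp), ih, max_eq_left hp]
      by_cases hall : ∀ x ∈ ps, x.2 ≤ s
      · rw [if_pos hall, if_pos (by
          intro x hx
          rcases List.mem_cons.mp hx with h | h
          · exact h ▸ hp
          · exact hall x h)]
      · rw [if_neg hall,
            if_neg (fun h => hall (fun x hx => h x (List.mem_cons_of_mem _ hx)))]
        have hall' := hall
        push_neg at hall'
        obtain ⟨x, hxmem, hxgt⟩ := hall'
        have hm : s < (ps.map Prod.snd).foldl max s :=
          lt_of_lt_of_le hxgt (le_foldl_max_of_mem _ _ _ (List.mem_map_of_mem hxmem))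
        rw [List.find?_cons_of_neg (by simp only [beq_iff_eq]; omega)]
    · push_neg at hp
      rw [if_pos hp, ih, max_eq_right (le_of_lt hp),
          if_neg (show ¬ ∀ x ∈ p :: ps, x.2 ≤ s by
            intro h
            exact absurd (h p List.mem_cons_self) (by omega))]
      by_cases hall : ∀ x ∈ ps, x.2 ≤ p.2
      · rw [if_pos hall]
        have hm : (ps.map Prod.snd).foldl max p.2 = p.2 :=
          foldl_max_eq_of_le _ _ (by
            intro x hx
            obtain ⟨q, hq, rfl⟩ := List.mem_map.mp hx
            exact hall q hq)
        rw [List.find?_cons_of_pos (by simp [hm])]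
      · rw [if_neg hall]
        have hall' := hall
        push_neg at hall'
        obtain ⟨x, hxmem, hxgt⟩ := hall'
        have hm : p.2 < (ps.map Prod.snd).foldl max p.2 :=
          lt_of_lt_of_le hxgt (le_foldl_max_of_mem _ _ _ (List.mem_map_of_mem hxmem))
        rw [List.find?_cons_of_neg (by simp only [beq_iff_eq]; omega)]

-- ===== VERDICT (by name: the statement is the Claim_ definition above) =====
theorem artista_mas_escuchado_spec : Claim_equal_artista_mas_escuchado := by
  intro repro _ hpre
  obtain ⟨hne, hnodup⟩ := hpre
  unfold Spec_artista_mas_escuchado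
  obtain _ | ⟨p, l⟩ := repro
  · exact absurd rfl hne
  · unfold artista_mas_escuchado artista_mas_escuchado_alt
    simp only [aloop_eq, List.nil_append, List.foldl_cons]
    simp only [← suma_eq_sum, PySem.Dict.getD_insert_self]
    simp only [List.map_cons, List.nodup_cons] at hnodup
    obtain ⟨hp_fresh, hnd⟩ := hnodup
    -- A's dict of totals: items is the list of (artist, total) pairs
    rw [PySem.Dict.items_foldl_insert_fresh l (fun p => p.1) (fun p => suma_reproducciones p.2)
        (PySem.Dict.empty.insert p.1 (suma_reproducciones p.2))
        (by
          intro a ha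
          rw [PySem.Dict.contains_insert]
          simp only [Bool.or_eq_false_iff]
          refine ⟨?_, PySem.Dict.contains_empty a.1⟩
          simp only [beq_eq_false_iff_ne, ne_eq]
          intro hcontra
          exact hp_fresh (hcontra ▸ List.mem_map_of_mem ha)) hnd]
    rw [PySem.Dict.items_insert_of_not_contains _ _ (PySem.Dict.contains_empty p.1)]
    have hitems : (PySem.Dict.empty (κ := String) (ν := Int)).items = [] := rfl
    rw [hitems, List.nil_append, List.singleton_append, List.singleton_append,
        maximo_eq_foldl_max]
    -- B's fold over the raw list is the fold over the (artist, total) pairs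
    have hB : l.foldl
        (fun (best : Option (String × Int)) p =>
          match best with
          | none => some (p.1, suma_reproducciones p.2)
          | some (a, s) =>
            if s < suma_reproducciones p.2 then some (p.1, suma_reproducciones p.2)
            else some (a, s))
        (some (p.1, suma_reproducciones p.2))
      = (l.map (fun p => (p.1, suma_reproducciones p.2))).foldl
          (fun (best : Option (String × Int)) q =>
            match best with
            | none => some (q.1, q.2)
            | some (a, s) => if s < q.2 then some (q.1, q.2) else some (a, s))
          (some (p.1, suma_reproducciones p.2)) := by
      rw [List.foldl_map]
    rw [hB, bfold_spec]
    have hmaps : ((l.map fun p => (p.1, suma_reproducciones p.2)).map Prod.snd)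
        = l.map (fun p => suma_reproducciones p.2) := by
      simp [List.map_map, Function.comp_def]
    rw [hmaps]
    by_cases hall : ∀ x ∈ l.map (fun p => (p.1, suma_reproducciones p.2)),
        x.2 ≤ suma_reproducciones p.2
    · rw [if_pos hall]
      have hM : (l.map (fun p => suma_reproducciones p.2)).foldl max (suma_reproducciones p.2)
          = suma_reproducciones p.2 :=
        foldl_max_eq_of_le _ _ (by
          intro x hx
          obtain ⟨q, hq, rfl⟩ := List.mem_map.mp hx
          exact hall (q.1, suma_reproducciones q.2) (List.mem_map_of_mem hq))
      rw [List.find?_cons_of_pos (by simp [hM])]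
    · rw [if_neg hall]
      have hall' := hall
      push_neg at hall'
      obtain ⟨x, hxmem, hxgt⟩ := hall'
      have hm : suma_reproducciones p.2
          < (l.map (fun p => suma_reproducciones p.2)).foldl max (suma_reproducciones p.2) := by
        refine lt_of_lt_of_le hxgt (le_foldl_max_of_mem _ _ _ ?_)
        obtain ⟨q, hq, rfl⟩ := List.mem_map.mp hxmem
        exact List.mem_map_of_mem hq
      rw [List.find?_cons_of_neg (by simp only [beq_iff_eq]; omega)]
      have hpred : (fun (q : String × Int) =>
            (l.map (fun p => suma_reproducciones p.2)).foldl max (suma_reproducciones p.2) == q.2)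
          = (fun (q : String × Int) =>
            q.2 == (l.map (fun p => suma_reproducciones p.2)).foldl max (suma_reproducciones p.2)) := by
        funext q
        exact Bool.eq_iff_iff.mpr (by simp only [beq_iff_eq]; exact eq_comm)
      rw [hpred]
      cases List.find? (fun (q : String × Int) =>
          q.2 == (l.map (fun p => suma_reproducciones p.2)).foldl max (suma_reproducciones p.2))
          (l.map (fun p => (p.1, suma_reproducciones p.2))) with
      | none => rfl
      | some q => rfl
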